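-- pv_equiv track=rewrite | github.com/hcheng628/algorithm-problems | algorithm-problems/src/main/java/us/supercheng/algorithm/problems/leetcode/checkifbinarystringhasatmostonesegmentofones/Solution.py | checkOnesSegment
-- ===== SOURCE A (Python) =====
-- def checkOnesSegment(s: str) -> bool:
--     l = []
--     for i in range(len(s)):
--         if s[i] == '1':
--             if len(l) > 0 and l[-1] + 1 != i:
--                 return False
--             l.append(i)
--
--     return True
-- ===== SOURCE B (Python) =====
-- def checkOnesSegment(s: str) -> bool:
--     # Compress the string into its run keys (one char per maximal run),
--     # then check there is at most one run of '1's.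
--     runs = []
--     prev = None
--     for c in s:
--         if c != prev:
--             runs.append(c)
--             prev = c
--     return runs.count('1') <= 1
-- ===== Notes on version B (the rewrite author's own statement) =====
-- stated objective: simpler
-- what changed: Replaces A's last-seen-index adjacency scan over positions of ones with a run-length-encoding pass (compress maximal runs to their keys) followed by counting how many runs consist of ones.
import Mathlib
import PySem

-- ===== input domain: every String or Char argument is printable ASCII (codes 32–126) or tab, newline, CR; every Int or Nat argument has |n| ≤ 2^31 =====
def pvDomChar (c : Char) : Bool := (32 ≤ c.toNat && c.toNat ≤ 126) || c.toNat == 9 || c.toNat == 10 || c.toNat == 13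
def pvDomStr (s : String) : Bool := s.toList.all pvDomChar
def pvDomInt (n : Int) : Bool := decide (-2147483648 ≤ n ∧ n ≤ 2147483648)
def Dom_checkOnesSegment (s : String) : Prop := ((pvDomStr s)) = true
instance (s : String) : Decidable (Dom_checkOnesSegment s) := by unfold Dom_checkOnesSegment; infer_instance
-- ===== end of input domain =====

-- B replaces A's last-seen-index adjacency scan with run-length encoding (compress maximal runs to their keys) then counting the one-runs; objective: simpler.


-- ===== PORT A =====
-- loop over indices, keeping the list l of indices of '1' seen so far; early return False becomes the first branch
def pvGoA : List Char → Int → List Int → Bool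
  | [], _, _ => true
  | c :: rest, i, l =>
    if c = '1' then
      if 0 < l.length ∧ (PySem.List.pyGet? l (-1)).getD 0 + 1 ≠ i then false
      else pvGoA rest (i + 1) (l ++ [i])
    else pvGoA rest (i + 1) l

def checkOnesSegment (s : String) : Bool := pvGoA s.toList 0 []

-- ===== PORT B =====
-- compress the string into its run keys (one char per maximal run), then count the '1' runs
def pvBuildRuns : List Char → Option Char → List Char → List Char
  | [], _, runs => runs
  | c :: rest, prev, runs =>
    if some c ≠ prev then pvBuildRuns rest (some c) (runs ++ [c])
    else pvBuildRuns rest prev runs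

def checkOnesSegment_alt (s : String) : Bool :=
  decide ((pvBuildRuns s.toList none []).count '1' ≤ 1)

-- ===== PRECONDITION & SPEC =====
def Spec_checkOnesSegment (s : String) (out : Bool) : Prop := out = checkOnesSegment_alt s
instance (s : String) (out : Bool) : Decidable (Spec_checkOnesSegment s out) := by unfold Spec_checkOnesSegment; infer_instance

-- ===== CLAIM (what is proved, stated in full; the proofs are below) =====
def Claim_equal_checkOnesSegment : Prop := ∀ (s : String), Dom_checkOnesSegment s → Spec_checkOnesSegment s (checkOnesSegment s)

-- ===== LEMMAS AND PROOFS =====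

-- number of NEW maximal runs of '1' in t, given whether the previous char was '1'
def pvCnt : List Char → Bool → Nat
  | [], _ => 0
  | c :: rest, true => if c = '1' then pvCnt rest true else pvCnt rest false
  | c :: rest, false => if c = '1' then 1 + pvCnt rest true else pvCnt rest false

theorem pvGet_last (l : List Int) (j : Int) :
    PySem.List.pyGet? (l ++ [j]) (-1) = some j :=
  PySem.List.pyGet?_neg_one_append_singleton l j

-- the three reachable states of A's scan, related to pvCnt
theorem pvGoA_key (t : List Char) :
    (∀ i : Int, pvGoA t i [] = decide (pvCnt t false ≤ 1)) ∧
    (∀ (i : Int) (l : List Int), pvGoA t i (l ++ [i - 1]) = decide (pvCnt t true = 0)) ∧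
    (∀ (i : Int) (l : List Int) (j : Int), j ≤ i - 2 →
      pvGoA t i (l ++ [j]) = decide (pvCnt t false = 0)) := by
  induction t with
  | nil => exact ⟨fun i => rfl, fun i l => rfl, fun i l j _ => rfl⟩
  | cons c rest ih =>
    obtain ⟨ih1, ih2, ih3⟩ := ih
    refine ⟨fun i => ?_, fun i l => ?_, fun i l j hj => ?_⟩
    · by_cases hc : c = '1'
      · have h2 := ih2 (i + 1) []
        have he : i + 1 - 1 = i := by omega
        rw [he] at h2
        simp only [pvGoA, pvCnt, if_pos hc, List.nil_append] at h2 ⊢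
        rw [if_neg (by simp), h2]
        simp only [decide_eq_decide]
        omega
      · simp only [pvGoA, pvCnt, if_neg hc]
        exact ih1 (i + 1)
    · by_cases hc : c = '1'
      · have h2 := ih2 (i + 1) (l ++ [i - 1])
        have he : i + 1 - 1 = i := by omega
        rw [he, List.append_assoc, List.singleton_append] at h2
        simp only [pvGoA, pvCnt, if_pos hc, pvGet_last]
        rw [if_neg (by simp), List.append_assoc, List.singleton_append, h2]
      · simp only [pvGoA, pvCnt, if_neg hc]
        exact ih3 (i + 1) l (i - 1) (by omega)
    · by_cases hc : c = '1'
      · simp only [pvGoA, pvCnt, if_pos hc, pvGet_last]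
        rw [if_pos (And.intro (by simp) (by simp; omega))]
        simp
      · simp only [pvGoA, pvCnt, if_neg hc]
        exact ih3 (i + 1) l j (by omega)

theorem pvBuildRuns_count (t : List Char) :
    ∀ (prev : Option Char) (runs : List Char),
      (pvBuildRuns t prev runs).count '1'
        = runs.count '1' + pvCnt t (prev == some '1') := by
  induction t with
  | nil => intro prev runs; simp [pvBuildRuns, pvCnt]
  | cons c rest ih =>
    intro prev runs
    by_cases hc : c = '1'
    · subst hc
      by_cases hp : prev = some '1'
      · subst hp
        simp only [pvBuildRuns, if_neg (not_not_intro rfl), beq_self_eq_true, pvCnt]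
        exact ih (some '1') runs
      · have hne : some '1' ≠ prev := fun h => hp h.symm
        have hflag : (prev == some '1') = false := by
          cases prev <;> simp_all
        simp only [pvBuildRuns, if_pos hne, hflag, pvCnt]
        rw [ih (some '1') (runs ++ ['1'])]
        simp [List.count_append]
        omega
    · have hflagc : ((some c : Option Char) == some '1') = false := by simp [hc]
      by_cases hp : some c = prev
      · have hflag : (prev == some '1') = false := by rw [← hp]; simp [hc]
        simp only [pvBuildRuns, if_neg (not_not_intro hp), hflag, pvCnt, if_neg hc]
        rw [ih prev runs, hflag]
      · simp only [pvBuildRuns, if_pos hp, pvCnt]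
        rw [ih (some c) (runs ++ [c]), hflagc]
        cases hb : (prev == some '1') <;>
          simp [pvCnt, List.count_append, hc]

-- ===== VERDICT (by name: the statement is the Claim_ definition above) =====
theorem checkOnesSegment_spec : Claim_equal_checkOnesSegment := by
  intro s _
  unfold Spec_checkOnesSegment checkOnesSegment checkOnesSegment_alt
  rw [(pvGoA_key s.toList).1 0, pvBuildRuns_count s.toList none []]
  simp
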